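-- pv_equiv track=rewrite | github.com/dangnm9699/coursera-data-structures-and-algorithms-specialization | course-2/week2_priority_queues_and_disjoint_sets/1_make_heap/build_heap.py | build_heap
-- ===== SOURCE A (Python) =====
-- def build_heap(data):
--     """Build a heap from ``data`` inplace.
--
--     Returns a sequence of swaps performed by the algorithm.
--     """
--     # The following naive implementation just sorts the given sequence
--     # using selection sort algorithm and saves the resulting sequence
--     # of swaps. This turns the given array into a heap, but in the worst
--     # case gives a quadratic number of swaps.
--     #
--     # TODO: replace by a more efficient implementation
--     swaps = []
--     n = len(data)
--     for i in range(n//2-1, -1, -1):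
--         largest = i
--         while True:
--             _largest = largest
--             left = 2 * largest + 1
--             right = 2 * largest + 2
--             if left < n and data[_largest] > data[left]:
--                 _largest = left
--             if right < n and data[_largest] > data[right]:
--                 _largest = right
--             if _largest != largest:
--                 data[largest], data[_largest] = data[_largest], data[largest]
--                 swaps.append((largest, _largest))
--                 largest = _largest
--             else:
--                 break
--
--     return swaps
-- ===== SOURCE B (Python) =====
-- def build_heap(data):
--     """Build a heap from ``data`` inplace.
--
--     Returns a sequence of swaps performed by the algorithm.
--     Same in-place mutation of ``data`` as the original.
--     """
--     n = len(data)
--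
--     def min_index(i):
--         # index of the smallest among node i and its existing children,
--         # ties keeping the earlier index (i, then left, then right)
--         acc = i
--         for c in (2 * i + 1, 2 * i + 2):
--             if c < n and data[c] < data[acc]:
--                 acc = c
--         return acc
--
--     def sift(i):
--         m = min_index(i)
--         if m == i:
--             return []
--         data[i], data[m] = data[m], data[i]
--         return [(i, m)] + sift(m)
--
--     out = []
--     for i in reversed(range(n // 2)):
--         out.extend(sift(i))
--     return out
-- ===== Notes on version B (the rewrite author's own statement) =====
-- stated objective: alternative
-- what changed: A's two hand-written child comparisons and while-True sink loop with a shared mutable swaps list are replaced by a min-index fold over the children plus a recursive sift that returns its swap sublist, driven by a recursive countdown instead of an accumulator loop.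
import Mathlib
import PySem

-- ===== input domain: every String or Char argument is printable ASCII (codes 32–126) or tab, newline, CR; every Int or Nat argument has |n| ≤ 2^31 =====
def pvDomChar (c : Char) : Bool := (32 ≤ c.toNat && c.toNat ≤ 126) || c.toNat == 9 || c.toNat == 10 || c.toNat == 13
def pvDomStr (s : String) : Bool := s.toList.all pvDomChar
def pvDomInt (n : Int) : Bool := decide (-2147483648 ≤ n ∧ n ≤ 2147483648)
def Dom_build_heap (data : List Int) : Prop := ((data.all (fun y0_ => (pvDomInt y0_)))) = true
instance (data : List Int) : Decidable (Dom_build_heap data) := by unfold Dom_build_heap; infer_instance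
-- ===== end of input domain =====

-- B replaces A's inner while-True sink loop (two hand-written child comparisons, mutable
-- `largest`, appends to a shared swaps list) by a min-index fold over the two children and a
-- well-founded recursive sift that RETURNS its swap sublist; same return value, and both
-- Pythons mutate `data` in place identically (the equivalence proved is about the return value).

-- ===== PORT A =====
-- A's inner `while True` loop, carried as fuel recursion (fuel = n is enough: `largest`
-- strictly increases below n each iteration, so the loop breaks before fuel runs out).
-- Indices are in-range nonnegative, so List.getD/List.set are exact for data[i] and the swap.
def buildHeapSinkA (n : Nat) : Nat → List Int → List (Int × Int) → Nat → List Int × List (Int × Int)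
  | 0, d, swaps, _ => (d, swaps)
  | fuel + 1, d, swaps, largest =>
    let left := 2 * largest + 1
    let right := 2 * largest + 2
    let m1 := if left < n ∧ d.getD largest 0 > d.getD left 0 then left else largest
    let m := if right < n ∧ d.getD m1 0 > d.getD right 0 then right else m1
    if m ≠ largest then
      buildHeapSinkA n fuel ((d.set largest (d.getD m 0)).set m (d.getD largest 0))
        (swaps ++ [((largest : Int), (m : Int))]) m
    else (d, swaps)

def build_heap (data : List Int) : List (Int × Int) :=
  let n := data.length
  ((List.range (n / 2)).reverse.foldl
    (fun (st : List Int × List (Int × Int)) i => buildHeapSinkA n n st.1 st.2 i)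
    (data, [])).2

-- ===== PORT B =====
-- B's min_index: a fold over the two-child tuple (2i+1, 2i+2), keeping the earlier index on ties.
def minIdxB (n : Nat) (d : List Int) (i : Nat) : Nat :=
  [2 * i + 1, 2 * i + 2].foldl
    (fun acc c => if c < n ∧ d.getD c 0 < d.getD acc 0 then c else acc) i

-- needed by siftB's decreasing_by: a strict child is below n and above i
theorem minIdxB_bounds (n : Nat) (d : List Int) (i : Nat) (h : ¬ minIdxB n d i = i) :
    i < minIdxB n d i ∧ minIdxB n d i < n := by
  simp only [minIdxB, List.foldl] at *
  split_ifs at * <;> omega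

-- B's sift: well-founded recursion on n - i (the min-index, when it moves, is a child > i).
def siftB (n : Nat) (d : List Int) (i : Nat) : List Int × List (Int × Int) :=
  if h : minIdxB n d i = i then (d, [])
  else
    let m := minIdxB n d i
    let p := siftB n ((d.set i (d.getD m 0)).set m (d.getD i 0)) m
    (p.1, ((i : Int), (m : Int)) :: p.2)
termination_by n - i
decreasing_by
  have := minIdxB_bounds n d i h
  omega

-- B's driver, recursive countdown: driveB k sifts i = k-1, k-2, …, 0, threading the array.
def driveB (n : Nat) (d : List Int) : Nat → List Int × List (Int × Int)
  | 0 => (d, [])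
  | k + 1 =>
    let p := siftB n d k
    let q := driveB n p.1 k
    (q.1, p.2 ++ q.2)

def build_heap_alt (data : List Int) : List (Int × Int) :=
  (driveB data.length data (data.length / 2)).2

-- ===== PRECONDITION & SPEC =====
def Spec_build_heap (data : List Int) (out : List (Int × Int)) : Prop := out = build_heap_alt data
instance (data : List Int) (out : List (Int × Int)) : Decidable (Spec_build_heap data out) := by unfold Spec_build_heap; infer_instance

-- ===== CLAIM (what is proved, stated in full; the proofs are below) =====
def Claim_equal_build_heap : Prop := ∀ (data : List Int), Dom_build_heap data → Spec_build_heap data (build_heap data)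

-- ===== LEMMAS AND PROOFS =====

-- A's two sequential >-comparisons compute exactly B's min-index fold
theorem minIdxB_eq_chain (n : Nat) (d : List Int) (i : Nat) :
    (if 2 * i + 2 < n ∧
        d.getD (if 2 * i + 1 < n ∧ d.getD i 0 > d.getD (2 * i + 1) 0 then 2 * i + 1 else i) 0
          > d.getD (2 * i + 2) 0
      then 2 * i + 2
      else if 2 * i + 1 < n ∧ d.getD i 0 > d.getD (2 * i + 1) 0 then 2 * i + 1 else i)
      = minIdxB n d i := by
  simp [minIdxB, List.foldl, gt_iff_lt]

theorem sink_eq (n : Nat) : ∀ (fuel i : Nat) (d : List Int) (swaps : List (Int × Int)),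
    i < n → n - i ≤ fuel →
    buildHeapSinkA n fuel d swaps i = ((siftB n d i).1, swaps ++ (siftB n d i).2) := by
  intro fuel
  induction fuel with
  | zero => intro i d swaps h1 h2; omega
  | succ fuel ih =>
    intro i d swaps hi hf
    rw [buildHeapSinkA, siftB]
    simp only [minIdxB_eq_chain]
    by_cases h : minIdxB n d i = i
    · simp [h]
    · have hb := minIdxB_bounds n d i h
      simp only [h, if_pos (Ne.symm h ∘ Eq.symm)]
      rw [ih _ _ _ (by omega) (by omega)]
      simp

theorem drive_eq (n : Nat) : ∀ (k : Nat), k ≤ n → ∀ (d : List Int) (swaps : List (Int × Int)),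
    (List.range k).reverse.foldl
      (fun (st : List Int × List (Int × Int)) i => buildHeapSinkA n n st.1 st.2 i) (d, swaps)
      = ((driveB n d k).1, swaps ++ (driveB n d k).2) := by
  intro k
  induction k with
  | zero => intro _ d swaps; simp [driveB]
  | succ k ih =>
    intro hk d swaps
    rw [List.range_succ]
    simp only [List.reverse_append, List.reverse_singleton, List.singleton_append, List.foldl_cons]
    rw [sink_eq n n k d swaps (by omega) (by omega), ih (by omega), driveB]
    simp

-- ===== VERDICT (by name: the statement is the Claim_ definition above) =====
theorem build_heap_spec : Claim_equal_build_heap := by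
  intro data _
  unfold Spec_build_heap build_heap build_heap_alt
  show ((List.range (data.length / 2)).reverse.foldl
      (fun (st : List Int × List (Int × Int)) i => buildHeapSinkA data.length data.length st.1 st.2 i)
      (data, [])).2 = _
  rw [drive_eq data.length (data.length / 2) (by omega) data []]
  simp
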